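-- pv_equiv track=rewrite | github.com/danny-ell77/digestly-be | app/services/utils.py | find_stop_word_boundary
-- ===== SOURCE A (Python) =====
-- def find_stop_word_boundary(text: str, max_chars: int) -> int:
--     """Find natural break point in text."""
--     if not text or max_chars <= 0:
--         return 0
--     if len(text) <= max_chars:
--         return len(text)
--
--     stop_words = [".\n", "!\n", "?\n", ". ", "! ", "? ", "\n\n", "; "]
--     search_text = text[:max_chars]
--
--     best_pos = -1
--     best_stop_len = 0
--
--     for stop_word in stop_words:
--         pos = search_text.rfind(stop_word)
--         if pos > best_pos:
--             best_pos = pos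
--             best_stop_len = len(stop_word)
--
--     if best_pos != -1:
--         return best_pos + best_stop_len
--
--     last_space = search_text.rfind(" ")
--     if last_space != -1:
--         return last_space + 1
--
--     return max_chars
-- ===== SOURCE B (Python) =====
-- def find_stop_word_boundary(text: str, max_chars: int) -> int:
--     """Find natural break point in text (single reverse-scan reimplementation)."""
--     if not text or max_chars <= 0:
--         return 0
--     if len(text) <= max_chars:
--         return len(text)
--     stops = {".\n", "!\n", "?\n", ". ", "! ", "? ", "\n\n", "; "}
--     s = text[:max_chars]
--     for i in range(len(s) - 2, -1, -1):
--         if s[i:i + 2] in stops: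
--             return i + 2
--     last_space = s.rfind(" ")
--     if last_space != -1:
--         return last_space + 1
--     return max_chars
-- ===== Notes on version B (the rewrite author's own statement) =====
-- stated objective: alternative
-- what changed: A runs eight separate rfind passes over the truncated text and keeps the maximum position; B makes a single reverse scan over the truncated text, returning at the first (hence highest) index whose two-character window is one of the eight stop words, with the same space/max_chars fallback.
import Mathlib
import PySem

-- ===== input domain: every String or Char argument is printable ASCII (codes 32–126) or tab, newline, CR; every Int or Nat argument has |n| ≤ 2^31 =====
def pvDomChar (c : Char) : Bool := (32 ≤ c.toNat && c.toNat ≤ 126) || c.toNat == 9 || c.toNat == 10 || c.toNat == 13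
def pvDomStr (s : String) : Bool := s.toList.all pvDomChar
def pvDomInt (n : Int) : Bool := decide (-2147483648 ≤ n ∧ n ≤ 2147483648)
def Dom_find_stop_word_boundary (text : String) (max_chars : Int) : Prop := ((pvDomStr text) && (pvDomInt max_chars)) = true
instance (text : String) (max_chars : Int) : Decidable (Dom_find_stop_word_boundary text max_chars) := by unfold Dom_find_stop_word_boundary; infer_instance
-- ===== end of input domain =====

-- B replaces A's eight separate rfind passes by one reverse scan that returns at the first
-- (hence highest) index whose two-character window is a stop word (objective: alternative).

-- ===== PORT A =====
def find_stop_word_boundary (text : String) (max_chars : Int) : Int :=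
  if text = "" ∨ max_chars ≤ 0 then 0
  else if PySem.Str.len text ≤ max_chars then PySem.Str.len text
  else
    let stop_words : List String := [".\n", "!\n", "?\n", ". ", "! ", "? ", "\n\n", "; "]
    let search_text := PySem.Str.slice text none (some max_chars)
    let best := stop_words.foldl
      (fun (st : Int × Int) stop_word =>
        let pos := PySem.Str.rfind search_text stop_word
        if st.1 < pos then (pos, PySem.Str.len stop_word) else st)
      (-1, 0)
    if best.1 ≠ -1 then best.1 + best.2
    else
      let last_space := PySem.Str.rfind search_text " "
      if last_space ≠ -1 then last_space + 1 else max_chars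

-- ===== PORT B =====
-- the eight stop words, all two characters, as character pairs
def pvStopPairs : List (Char × Char) :=
  [('.', '\n'), ('!', '\n'), ('?', '\n'), ('.', ' '), ('!', ' '), ('?', ' '), ('\n', '\n'), (';', ' ')]

-- s[i:i+2] in stops
def pvPairAt (cs : List Char) (i : Nat) : Bool :=
  match cs.drop i with
  | a :: b :: _ => pvStopPairs.contains (a, b)
  | _ => false

-- the reverse for-loop: checks index k first, then k-1, …, 0; some (i+2) at the first hit
def pvScan (cs : List Char) : Nat → Option Int
  | 0 => if pvPairAt cs 0 then some 2 else none
  | j + 1 => if pvPairAt cs (j + 1) then some ((j : Int) + 3) else pvScan cs j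

def find_stop_word_boundary_alt (text : String) (max_chars : Int) : Int :=
  if text = "" ∨ max_chars ≤ 0 then 0
  else if PySem.Str.len text ≤ max_chars then PySem.Str.len text
  else
    let s := PySem.Str.slice text none (some max_chars)
    match pvScan s.toList (s.toList.length - 2) with
    | some v => v
    | none =>
      let last_space := PySem.Str.rfind s " "
      if last_space ≠ -1 then last_space + 1 else max_chars

-- ===== PRECONDITION & SPEC =====
def Spec_find_stop_word_boundary (text : String) (max_chars : Int) (out : Int) : Prop := out = find_stop_word_boundary_alt text max_chars
instance (text : String) (max_chars : Int) (out : Int) : Decidable (Spec_find_stop_word_boundary text max_chars out) := by unfold Spec_find_stop_word_boundary; infer_instance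

-- ===== CLAIM (what is proved, stated in full; the proofs are below) =====
def Claim_equal_find_stop_word_boundary : Prop := ∀ (text : String) (max_chars : Int), Dom_find_stop_word_boundary text max_chars → Spec_find_stop_word_boundary text max_chars (find_stop_word_boundary text max_chars)

-- ===== LEMMAS AND PROOFS =====

-- rfind.go finds the greatest i ≤ k at which sub is a prefix of cs.drop i
theorem pv_go_spec (cs w : List Char) (k : Nat) :
    PySem.Chars.rfind.go cs w k =
      if ∃ i ≤ k, w <+: cs.drop i
      then ((Nat.findGreatest (fun i => w <+: cs.drop i) k : Nat) : Int) else -1 := by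
  induction k with
  | zero =>
    rw [show PySem.Chars.rfind.go cs w 0 = if w.isPrefixOf cs then 0 else -1 from by
      simp [PySem.Chars.rfind.go]]
    by_cases h : w <+: cs
    · have hE : ∃ i ≤ 0, w <+: cs.drop i := ⟨0, le_refl _, by simpa using h⟩
      simp [h, List.isPrefixOf_iff_prefix]
    · rw [if_neg (by simpa [List.isPrefixOf_iff_prefix] using h),
        if_neg (by rintro ⟨i, hi, hp⟩; interval_cases i; simp at hp; exact h hp)]
  | succ j ih =>
    rw [show PySem.Chars.rfind.go cs w (j+1) =
        if w.isPrefixOf (cs.drop (j+1)) then ((j:Int)+1) else PySem.Chars.rfind.go cs w j from by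
      simp [PySem.Chars.rfind.go]]
    rw [Nat.findGreatest_succ]
    by_cases h : w <+: cs.drop (j+1)
    · have hE : ∃ i ≤ j+1, w <+: cs.drop i := ⟨j+1, le_refl _, h⟩
      simp [List.isPrefixOf_iff_prefix, h, hE]
    · rw [if_neg (by simpa [List.isPrefixOf_iff_prefix] using h), ih, if_neg h]
      have hiff : (∃ i ≤ j+1, w <+: cs.drop i) ↔ (∃ i ≤ j, w <+: cs.drop i) := by
        constructor
        · rintro ⟨i, hi, hp⟩
          rcases Nat.lt_or_ge i (j+1) with h'|h'
          · exact ⟨i, by omega, hp⟩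
          · exact absurd hp (by rw [show i = j+1 by omega]; exact h)
        · rintro ⟨i, hi, hp⟩; exact ⟨i, by omega, hp⟩
      by_cases hE : ∃ i ≤ j, w <+: cs.drop i
      · rw [if_pos (hiff.mpr hE), if_pos hE]
      · rw [if_neg (fun c => hE (hiff.mp c)), if_neg hE]

-- pvScan finds the greatest i ≤ k with a stop-pair window, returning i + 2
theorem pvScan_spec (cs : List Char) (k : Nat) :
    pvScan cs k =
      if ∃ i ≤ k, pvPairAt cs i = true
      then some (((Nat.findGreatest (fun i => pvPairAt cs i = true) k : Nat) : Int) + 2) else none := by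
  induction k with
  | zero =>
    by_cases h : pvPairAt cs 0 = true
    · have hE : ∃ i ≤ 0, pvPairAt cs i = true := ⟨0, le_refl _, h⟩
      simp [pvScan, h]
    · rw [show pvScan cs 0 = if pvPairAt cs 0 then some 2 else none from rfl, if_neg h,
        if_neg (by rintro ⟨i, hi, hp⟩; interval_cases i; exact h hp)]
  | succ j ih =>
    rw [show pvScan cs (j+1) = if pvPairAt cs (j+1) then some ((j:Int)+3) else pvScan cs j from rfl,
      Nat.findGreatest_succ]
    by_cases h : pvPairAt cs (j+1) = true
    · have hE : ∃ i ≤ j+1, pvPairAt cs i = true := ⟨j+1, le_refl _, h⟩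
      have hc : ((j:Int)+3) = (((j+1 : Nat) : Nat) : Int) + 2 := by push_cast; ring
      rw [if_pos h, if_pos hE, if_pos h, hc]
    · rw [if_neg h, ih, if_neg h]
      have hiff : (∃ i ≤ j+1, pvPairAt cs i = true) ↔ (∃ i ≤ j, pvPairAt cs i = true) := by
        constructor
        · rintro ⟨i, hi, hp⟩
          rcases Nat.lt_or_ge i (j+1) with h'|h'
          · exact ⟨i, by omega, hp⟩
          · exact absurd hp (by rw [show i = j+1 by omega]; exact h)
        · rintro ⟨i, hi, hp⟩; exact ⟨i, by omega, hp⟩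
      by_cases hE : ∃ i ≤ j, pvPairAt cs i = true
      · rw [if_pos (hiff.mpr hE), if_pos hE]
      · rw [if_neg (fun c => hE (hiff.mp c)), if_neg hE]

-- the window test agrees with "some stop word is a prefix here"
theorem pvPairAt_iff (cs : List Char) (i : Nat) :
    pvPairAt cs i = true ↔
      ∃ w ∈ ([".\n", "!\n", "?\n", ". ", "! ", "? ", "\n\n", "; "] : List String),
        w.toList <+: cs.drop i := by
  unfold pvPairAt
  rcases hd : cs.drop i with _ | ⟨a, _ | ⟨b, r⟩⟩
  · simp [List.prefix_nil]
  · constructor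
    · intro h; simp at h
    · rintro ⟨w, hw, hp⟩
      fin_cases hw <;> simp_all [List.cons_prefix_cons, List.prefix_nil]
  · constructor
    · intro h
      simp only [pvStopPairs, List.contains_cons, List.contains_nil, Bool.or_eq_true, beq_iff_eq,
        Prod.mk.injEq, Bool.false_eq_true, or_false] at h
      rcases h with ⟨rfl,rfl⟩|⟨rfl,rfl⟩|⟨rfl,rfl⟩|⟨rfl,rfl⟩|⟨rfl,rfl⟩|⟨rfl,rfl⟩|⟨rfl,rfl⟩|⟨rfl,rfl⟩
      · exact ⟨".\n", by simp, ⟨r, rfl⟩⟩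
      · exact ⟨"!\n", by simp, ⟨r, rfl⟩⟩
      · exact ⟨"?\n", by simp, ⟨r, rfl⟩⟩
      · exact ⟨". ", by simp, ⟨r, rfl⟩⟩
      · exact ⟨"! ", by simp, ⟨r, rfl⟩⟩
      · exact ⟨"? ", by simp, ⟨r, rfl⟩⟩
      · exact ⟨"\n\n", by simp, ⟨r, rfl⟩⟩
      · exact ⟨"; ", by simp, ⟨r, rfl⟩⟩
    · rintro ⟨w, hw, hp⟩
      fin_cases hw <;>
        (obtain ⟨t, hp⟩ := hp; injection hp with h1 hp; injection hp with h2 hp;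
          subst h1; subst h2; rfl)

theorem pvPairAt_le (cs : List Char) (i : Nat) (h : pvPairAt cs i = true) : i + 2 ≤ cs.length := by
  unfold pvPairAt at h
  rcases hd : cs.drop i with _ | ⟨a, _ | ⟨b, r⟩⟩ <;> rw [hd] at h
  · simp at h
  · simp at h
  · have := congrArg List.length hd
    simp at this
    omega

-- A's fold over the stop words: characterisation of both components
theorem pv_foldA_spec (s : String) (ws : List String) (p l : Int)
    (hw2 : ∀ w ∈ ws, PySem.Str.len w = 2) :
      p ≤ (ws.foldl
        (fun (st : Int × Int) stop_word =>
          if st.1 < PySem.Str.rfind s stop_word then (PySem.Str.rfind s stop_word, PySem.Str.len stop_word) else st) (p, l)).1 ∧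
      ((ws.foldl
        (fun (st : Int × Int) stop_word =>
          if st.1 < PySem.Str.rfind s stop_word then (PySem.Str.rfind s stop_word, PySem.Str.len stop_word) else st) (p, l)) = (p, l) ∨
        ∃ w ∈ ws, (ws.foldl
        (fun (st : Int × Int) stop_word =>
          if st.1 < PySem.Str.rfind s stop_word then (PySem.Str.rfind s stop_word, PySem.Str.len stop_word) else st) (p, l)).1 = PySem.Str.rfind s w ∧
          (ws.foldl
        (fun (st : Int × Int) stop_word =>
          if st.1 < PySem.Str.rfind s stop_word then (PySem.Str.rfind s stop_word, PySem.Str.len stop_word) else st) (p, l)).2 = 2 ∧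
          p < (ws.foldl
        (fun (st : Int × Int) stop_word =>
          if st.1 < PySem.Str.rfind s stop_word then (PySem.Str.rfind s stop_word, PySem.Str.len stop_word) else st) (p, l)).1) ∧
      ∀ w ∈ ws, PySem.Str.rfind s w ≤ (ws.foldl
        (fun (st : Int × Int) stop_word =>
          if st.1 < PySem.Str.rfind s stop_word then (PySem.Str.rfind s stop_word, PySem.Str.len stop_word) else st) (p, l)).1 := by
  induction ws generalizing p l with
  | nil => simp
  | cons w ws ih =>
    simp only [List.foldl_cons]
    by_cases h : p < PySem.Str.rfind s w
    · rw [if_pos h, hw2 w (by simp)]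
      obtain ⟨h1, h2, h3⟩ := ih (PySem.Str.rfind s w) 2 (fun w' hw' => hw2 w' (by simp [hw']))
      refine ⟨by omega, ?_, ?_⟩
      · rcases h2 with he | ⟨w', hw', e1, e2, e3⟩
        · exact Or.inr ⟨w, by simp, by rw [he], by rw [he], by rw [he]; exact h⟩
        · exact Or.inr ⟨w', by simp [hw'], e1, e2, by omega⟩
      · intro w' hw'
        rcases List.mem_cons.mp hw' with rfl | hw''
        · omega
        · exact h3 w' hw''
    · rw [if_neg h]
      obtain ⟨h1, h2, h3⟩ := ih p l (fun w' hw' => hw2 w' (by simp [hw']))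
      refine ⟨h1, ?_, ?_⟩
      · rcases h2 with he | ⟨w', hw', e1, e2, e3⟩
        · exact Or.inl he
        · exact Or.inr ⟨w', by simp [hw'], e1, e2, e3⟩
      · intro w' hw'
        rcases List.mem_cons.mp hw' with rfl | hw''
        · omega
        · exact h3 w' hw''

-- ===== VERDICT (by name: the statement is the Claim_ definition above) =====
theorem find_stop_word_boundary_spec : Claim_equal_find_stop_word_boundary := by
  intro text max_chars _hdom
  unfold Spec_find_stop_word_boundary find_stop_word_boundary find_stop_word_boundary_alt
  by_cases hg1 : text = "" ∨ max_chars ≤ 0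
  · rw [if_pos hg1, if_pos hg1]
  rw [if_neg hg1, if_neg hg1]
  by_cases hg2 : PySem.Str.len text ≤ max_chars
  · rw [if_pos hg2, if_pos hg2]
  rw [if_neg hg2, if_neg hg2]
  set s := PySem.Str.slice text none (some max_chars) with hs
  set cs := s.toList with hcs
  show (let best := List.foldl
          (fun (st : Int × Int) stop_word =>
            if st.1 < PySem.Str.rfind s stop_word
            then (PySem.Str.rfind s stop_word, PySem.Str.len stop_word) else st)
          ((-1 : Int), (0 : Int)) [".\n", "!\n", "?\n", ". ", "! ", "? ", "\n\n", "; "];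
        if best.1 ≠ -1 then best.1 + best.2
        else if PySem.Str.rfind s " " ≠ -1 then PySem.Str.rfind s " " + 1 else max_chars) =
      (match pvScan cs (cs.length - 2) with
       | some v => v
       | none => if PySem.Str.rfind s " " ≠ -1 then PySem.Str.rfind s " " + 1 else max_chars)
  simp only []
  -- notation
  set ws : List String := [".\n", "!\n", "?\n", ". ", "! ", "? ", "\n\n", "; "] with hws
  set F := List.foldl
          (fun (st : Int × Int) stop_word =>
            if st.1 < PySem.Str.rfind s stop_word
            then (PySem.Str.rfind s stop_word, PySem.Str.len stop_word) else st)
          ((-1 : Int), (0 : Int)) ws with hF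
  -- per-word rfind characterisation
  have hR : ∀ w : String, PySem.Str.rfind s w =
      if ∃ i ≤ cs.length, w.toList <+: cs.drop i
      then ((Nat.findGreatest (fun i => w.toList <+: cs.drop i) cs.length : Nat) : Int) else -1 := by
    intro w
    have h1 : PySem.Str.rfind s w = PySem.Chars.rfind cs w.toList := by
      rw [hcs]; simp
    rw [h1, show PySem.Chars.rfind cs w.toList = PySem.Chars.rfind.go cs w.toList cs.length from rfl,
      pv_go_spec]
  obtain ⟨hf1, hf2, hf3⟩ := pv_foldA_spec s ws (-1) 0 (by rw [hws]; decide)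
  rw [← hF] at hf1 hf2 hf3
  rw [pvScan_spec]
  by_cases hE : ∃ i ≤ cs.length - 2, pvPairAt cs i = true
  · rw [if_pos hE]
    obtain ⟨i0, hi0, hQ0⟩ := hE
    set g := Nat.findGreatest (fun i => pvPairAt cs i = true) (cs.length - 2) with hg
    have hQg : pvPairAt cs g = true := by
      rw [hg]; exact Nat.findGreatest_spec (P := fun i => pvPairAt cs i = true) hi0 hQ0
    -- A's best.1 is nonnegative
    obtain ⟨w0, hw0, hp0⟩ := (pvPairAt_iff cs i0).mp hQ0
    have hRw0 : PySem.Str.rfind s w0 =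
        ((Nat.findGreatest (fun i => w0.toList <+: cs.drop i) cs.length : Nat) : Int) := by
      rw [hR w0, if_pos ⟨i0, by omega, hp0⟩]
    have hFpos : 0 ≤ F.1 := le_trans (by rw [hRw0]; exact Int.natCast_nonneg _) (hf3 w0 hw0)
    rw [if_pos (by omega : F.1 ≠ -1)]
    -- identify F with some word's findGreatest
    rcases hf2 with he | ⟨wb, hwb, e1, e2, e3⟩
    · rw [he] at hFpos; norm_num at hFpos
    · set Gb := Nat.findGreatest (fun i => wb.toList <+: cs.drop i) cs.length with hGb
      have hexb : ∃ i ≤ cs.length, wb.toList <+: cs.drop i := by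
        by_contra hx
        rw [hR wb, if_neg hx] at e1; omega
      have hRb : PySem.Str.rfind s wb = (Gb : Int) := by
        rw [hR wb, if_pos hexb]
      -- Q holds at Gb
      obtain ⟨ib, hib, hpb⟩ := hexb
      have hQGb : pvPairAt cs Gb = true :=
        (pvPairAt_iff cs Gb).mpr ⟨wb, hwb, by
          rw [hGb]; exact Nat.findGreatest_spec (P := fun i => wb.toList <+: cs.drop i) hib hpb⟩
      -- Gb ≤ g
      have hle1 : Gb ≤ g := by
        rw [hg]
        exact Nat.le_findGreatest (P := fun i => pvPairAt cs i = true)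
          (by have := pvPairAt_le cs Gb hQGb; omega) hQGb
      -- g ≤ Gb
      obtain ⟨w1, hw1, hp1⟩ := (pvPairAt_iff cs g).mp hQg
      have hle2 : g ≤ Gb := by
        have hglen : g ≤ cs.length := by
          have := pvPairAt_le cs g hQg; omega
        have h1 : (g : Int) ≤ PySem.Str.rfind s w1 := by
          rw [hR w1, if_pos ⟨g, hglen, hp1⟩]
          exact_mod_cast Nat.le_findGreatest (P := fun i => w1.toList <+: cs.drop i) hglen hp1
        have h2 : PySem.Str.rfind s w1 ≤ F.1 := hf3 w1 hw1
        rw [e1, hRb] at h2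
        omega
      have : Gb = g := le_antisymm hle1 hle2
      rw [e1, e2, hRb, this]
  · rw [if_neg hE]
    -- no stop word occurs anywhere: every rfind is -1
    have hnoQ : ∀ i, pvPairAt cs i ≠ true := by
      intro i hQ
      exact hE ⟨i, by have := pvPairAt_le cs i hQ; omega, hQ⟩
    have hRneg : ∀ w ∈ ws, PySem.Str.rfind s w = -1 := by
      intro w hw
      rw [hR w, if_neg]
      rintro ⟨i, hi, hp⟩
      exact hnoQ i ((pvPairAt_iff cs i).mpr ⟨w, hw, hp⟩)
    rcases hf2 with he | ⟨wb, hwb, e1, e2, e3⟩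
    · rw [he]
      norm_num
    · rw [hRneg wb hwb] at e1; omega
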